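-- pv_equiv track=rewrite | github.com/Vietanh09876/y3embprog | week 6.py | rainfall_ana
-- ===== SOURCE A (Python) =====
-- def rainfall_ana(rain_list):
--     dry_day = 0
--     aver_day = 0
--     heavy_day = 0
--
--     for i in rain_list:
--         if i <= 20:
--             dry_day += 1
--         elif i >= 65:
--             heavy_day += 1
--         else:
--             aver_day += 1
--
--     return dry_day, aver_day, heavy_day
-- ===== SOURCE B (Python) =====
-- def rainfall_ana(rain_list):
--     dry = sum(1 for i in rain_list if i <= 20)
--     heavy = sum(1 for i in rain_list if i >= 65)
--     aver = len(rain_list) - dry - heavy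
--     return dry, aver, heavy
-- ===== Notes on version B (the rewrite author's own statement) =====
-- stated objective: simpler
-- what changed: Replaces the single fused if/elif/else loop over three counters with three independent scans: dry and heavy counted by separate generator sums, and the average bucket computed arithmetically as len - dry - heavy.
import Mathlib
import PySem

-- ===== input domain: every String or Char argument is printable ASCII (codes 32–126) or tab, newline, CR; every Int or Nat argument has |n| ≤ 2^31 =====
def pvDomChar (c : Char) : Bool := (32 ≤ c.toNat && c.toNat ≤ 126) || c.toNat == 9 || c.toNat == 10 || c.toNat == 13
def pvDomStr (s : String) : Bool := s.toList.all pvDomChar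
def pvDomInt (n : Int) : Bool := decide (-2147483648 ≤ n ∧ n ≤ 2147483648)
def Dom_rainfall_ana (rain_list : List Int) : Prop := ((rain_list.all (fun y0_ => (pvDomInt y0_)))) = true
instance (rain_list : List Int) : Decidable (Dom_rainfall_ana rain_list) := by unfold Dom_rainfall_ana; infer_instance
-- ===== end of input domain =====

-- B replaces A's single fused if/elif/else loop with three independent scans (dry and heavy counted separately, aver = len - dry - heavy); objective: simpler.
-- ===== PORT A =====
-- Port of A: one fold over the list carrying the three counters (dry, aver, heavy).
def rainfall_ana (rain_list : List Int) : Int × Int × Int :=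
  rain_list.foldl
    (fun (s : Int × Int × Int) i =>
      if i ≤ 20 then (s.1 + 1, s.2.1, s.2.2)
      else if i ≥ 65 then (s.1, s.2.1, s.2.2 + 1)
      else (s.1, s.2.1 + 1, s.2.2))
    (0, 0, 0)

-- ===== PORT B =====
-- Port of B: three independent scans; the middle bucket is len - dry - heavy.
def rainfall_ana_alt (rain_list : List Int) : Int × Int × Int :=
  let dry : Int := ((rain_list.filter (fun i => i ≤ 20)).map (fun _ => (1 : Int))).sum
  let heavy : Int := ((rain_list.filter (fun i => i ≥ 65)).map (fun _ => (1 : Int))).sum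
  (dry, (rain_list.length : Int) - dry - heavy, heavy)

-- ===== PRECONDITION & SPEC =====
def Spec_rainfall_ana (rain_list : List Int) (out : Int × Int × Int) : Prop := out = rainfall_ana_alt rain_list
instance (rain_list : List Int) (out : Int × Int × Int) : Decidable (Spec_rainfall_ana rain_list out) := by unfold Spec_rainfall_ana; infer_instance

-- ===== CLAIM (what is proved, stated in full; the proofs are below) =====
def Claim_equal_rainfall_ana : Prop := ∀ (rain_list : List Int), Dom_rainfall_ana rain_list → Spec_rainfall_ana rain_list (rainfall_ana rain_list)

-- ===== LEMMAS AND PROOFS =====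

-- ===== VERDICT (by name: the statement is the Claim_ definition above) =====
theorem fold_char (xs : List Int) (d a h : Int) :
    xs.foldl
      (fun (s : Int × Int × Int) i =>
        if i ≤ 20 then (s.1 + 1, s.2.1, s.2.2)
        else if i ≥ 65 then (s.1, s.2.1, s.2.2 + 1)
        else (s.1, s.2.1 + 1, s.2.2))
      (d, a, h)
    = (d + ((xs.filter (fun i => i ≤ 20)).length : Int),
       a + ((xs.length : Int) - ((xs.filter (fun i => i ≤ 20)).length : Int)
              - ((xs.filter (fun i => i ≥ 65)).length : Int)),
       h + ((xs.filter (fun i => i ≥ 65)).length : Int)) := by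
  induction xs generalizing d a h with
  | nil => simp
  | cons x xs ih =>
    simp only [List.foldl_cons]
    split_ifs with h1 h2
    · have h2 : ¬ (x ≥ 65) := by omega
      rw [ih]
      simp [List.filter_cons, h1, h2, Prod.ext_iff]
      push_cast
      omega
    · rw [ih]
      simp [List.filter_cons, h1, h2, Prod.ext_iff]
      push_cast
      omega
    · rw [ih]
      simp [List.filter_cons, h1, h2, Prod.ext_iff]
      push_cast
      omega

theorem sum_ones (l : List Int) : (l.map (fun _ => (1 : Int))).sum = (l.length : Int) := by
  induction l with
  | nil => rfl
  | cons x l ih => simp [ih]; ring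

theorem alt_lengths (xs : List Int) :
    rainfall_ana_alt xs =
      (((xs.filter (fun i => i ≤ 20)).length : Int),
       (xs.length : Int) - ((xs.filter (fun i => i ≤ 20)).length : Int)
         - ((xs.filter (fun i => i ≥ 65)).length : Int),
       ((xs.filter (fun i => i ≥ 65)).length : Int)) := by
  simp [rainfall_ana_alt, sum_ones]

theorem agree (xs : List Int) : rainfall_ana xs = rainfall_ana_alt xs := by
  rw [alt_lengths]
  show List.foldl _ ((0:Int), (0:Int), (0:Int)) xs = _
  rw [fold_char]
  simp

theorem rainfall_ana_spec : Claim_equal_rainfall_ana := by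
  intro xs _
  unfold Spec_rainfall_ana
  exact agree xs
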